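-- pv_equiv track=rewrite | github.com/kyungheee/Data-structure-and-Algorithms | day-07/devzoe/할인_행사.py | solution
-- ===== SOURCE A (Python) =====
-- def solution(want, number, discount):
--     answer = 0
--     a = {}
--     for w, n in zip(want,number):
--         a[w] = n
--     for i in range(len(discount) - 9) :
--         dict = {}
--         for j in range(0,10):
--             dict[discount[i+j]] = dict.get(discount[i+j], 0) + 1
--         if all(dict.get(w, 0) >= n for w, n in a.items()):
--             answer += 1
--     return answer
-- ===== SOURCE B (Python) =====
-- def _bump(cnt, sat, need, x, d):
--     before = cnt.get(x, 0)
--     after = before + d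
--     cnt[x] = after
--     if x in need:
--         n = need[x]
--         if before >= n and after < n:
--             sat -= 1
--         elif before < n and after >= n:
--             sat += 1
--     return sat
--
--
-- def solution(want, number, discount):
--     need = {}
--     for w, n in zip(want, number):
--         need[w] = n
--     if len(discount) < 10:
--         return 0
--     cnt = {}
--     for x in discount[:10]:
--         cnt[x] = cnt.get(x, 0) + 1
--     sat = sum(1 for w, n in need.items() if cnt.get(w, 0) >= n)
--     answer = 1 if sat == len(need) else 0
--     for i in range(1, len(discount) - 9):
--         sat = _bump(cnt, sat, need, discount[i - 1], -1)
--         sat = _bump(cnt, sat, need, discount[i + 9], 1)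
--         if sat == len(need):
--             answer += 1
--     return answer
-- ===== Notes on version B (the rewrite author's own statement) =====
-- stated objective: faster
-- what changed: Replaces A's per-window rebuild of a 10-element count dict plus a full all(...) scan of the wanted items with a single sliding-window pass that maintains one count dict and an incremental 'satisfied' counter, updating only the two keys that enter/leave each window.
import Mathlib
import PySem

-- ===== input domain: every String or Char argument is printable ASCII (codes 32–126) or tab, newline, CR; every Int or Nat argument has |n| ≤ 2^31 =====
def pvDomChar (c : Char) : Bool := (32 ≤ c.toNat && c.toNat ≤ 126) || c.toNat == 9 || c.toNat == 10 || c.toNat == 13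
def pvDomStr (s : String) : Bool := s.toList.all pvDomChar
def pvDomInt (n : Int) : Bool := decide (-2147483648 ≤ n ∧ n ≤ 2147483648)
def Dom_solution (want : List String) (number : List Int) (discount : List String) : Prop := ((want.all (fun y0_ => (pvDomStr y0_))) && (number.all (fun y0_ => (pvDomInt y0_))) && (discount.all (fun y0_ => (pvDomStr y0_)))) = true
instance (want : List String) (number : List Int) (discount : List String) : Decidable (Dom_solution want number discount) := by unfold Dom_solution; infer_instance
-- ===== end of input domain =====

-- B replaces A's per-window rebuild of a count dict plus a full scan of the wanted items by one
-- sliding-window pass maintaining a single count dict and an incremental 'satisfied' counter.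

-- ===== PORT A =====
-- A: rebuild a 10-element count dict for each window and test all wanted pairs.
def solution (want : List String) (number : List Int) (discount : List String) : Int :=
  let a := (List.zip want number).foldl (fun d p => d.insert p.1 p.2)
    (PySem.Dict.empty : PySem.Dict String Int)
  (PySem.List.pyRange 0 ((discount.length : Int) - 9)).foldl (fun answer i =>
    let dct := (PySem.List.pyRange 0 10).foldl (fun d j =>
      -- discount[i+j]: the index is always in range for the i, j this loop reaches
      d.insert (PySem.List.pyGetD discount (i + j) "")
        (d.getD (PySem.List.pyGetD discount (i + j) "") 0 + 1))
      (PySem.Dict.empty : PySem.Dict String Int)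
    if a.items.all (fun p => p.2 ≤ dct.getD p.1 0) then answer + 1 else answer) 0

-- ===== PORT B =====
-- _bump of Source B: shift one key's count by d and adjust the satisfied counter for that key.
def bumpB (cnt : PySem.Dict String Int) (sat : Int) (need : PySem.Dict String Int)
    (x : String) (d : Int) : PySem.Dict String Int × Int :=
  let before := cnt.getD x 0
  let after := before + d
  let cnt' := cnt.insert x after
  match need.get? x with
  | some n =>
    if n ≤ before ∧ after < n then (cnt', sat - 1)
    else if before < n ∧ n ≤ after then (cnt', sat + 1)
    else (cnt', sat)
  | none => (cnt', sat)

def solution_alt (want : List String) (number : List Int) (discount : List String) : Int :=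
  let need := (List.zip want number).foldl (fun d p => d.insert p.1 p.2)
    (PySem.Dict.empty : PySem.Dict String Int)
  if discount.length < 10 then 0
  else
    let cnt0 := (PySem.List.slice discount none (some 10)).foldl
      (fun d x => d.insert x (d.getD x 0 + 1)) (PySem.Dict.empty : PySem.Dict String Int)
    let sat0 := need.items.foldl (fun s p => if p.2 ≤ cnt0.getD p.1 0 then s + 1 else s) (0 : Int)
    let answer0 : Int := if sat0 = (need.size : Int) then 1 else 0
    let st := (PySem.List.pyRange 1 ((discount.length : Int) - 9)).foldl (fun st i =>
      let r1 := bumpB st.2.1 st.2.2 need (PySem.List.pyGetD discount (i - 1) "") (-1)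
      let r2 := bumpB r1.1 r1.2 need (PySem.List.pyGetD discount (i + 9) "") 1
      (if r2.2 = (need.size : Int) then st.1 + 1 else st.1, r2.1, r2.2))
      (answer0, cnt0, sat0)
    st.1

-- ===== PRECONDITION & SPEC =====
def Spec_solution (want : List String) (number : List Int) (discount : List String) (out : Int) : Prop := out = solution_alt want number discount
instance (want : List String) (number : List Int) (discount : List String) (out : Int) : Decidable (Spec_solution want number discount out) := by unfold Spec_solution; infer_instance

-- ===== CLAIM (what is proved, stated in full; the proofs are below) =====
def Claim_equal_solution : Prop := ∀ (want : List String) (number : List Int) (discount : List String), Dom_solution want number discount → Spec_solution want number discount (solution want number discount)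

-- ===== LEMMAS AND PROOFS =====

-- the window of 10 starting at index k
def winW (L : List String) (k : Nat) : List String := (L.drop k).take 10

-- "window ws satisfies every wanted pair"
def checkN (a : PySem.Dict String Int) (ws : List String) : Bool :=
  a.items.all (fun p => p.2 ≤ (ws.count p.1 : Int))

-- number of wanted pairs satisfied under a count function f
def satN' (a : PySem.Dict String Int) (f : String → Int) : Nat :=
  a.items.countP (fun p => p.2 ≤ f p.1)

-- number of wanted pairs satisfied by window ws
def satN (a : PySem.Dict String Int) (ws : List String) : Nat :=
  satN' a (fun y => (ws.count y : Int))

-- B's loop body (definitionally the body of the fold in solution_alt)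
def bodyB (L : List String) (need : PySem.Dict String Int)
    (st : Int × PySem.Dict String Int × Int) (i : Int) : Int × PySem.Dict String Int × Int :=
  let r1 := bumpB st.2.1 st.2.2 need (PySem.List.pyGetD L (i - 1) "") (-1)
  let r2 := bumpB r1.1 r1.2 need (PySem.List.pyGetD L (i + 9) "") 1
  (if r2.2 = (need.size : Int) then st.1 + 1 else st.1, r2.1, r2.2)

lemma checkN_iff_satN (a : PySem.Dict String Int) (ws : List String) :
    (checkN a ws = true) ↔ satN a ws = a.items.length := by
  unfold checkN satN satN'
  rw [List.countP_eq_length, List.all_eq_true]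

lemma satN'_congr (a : PySem.Dict String Int) (f g : String → Int) (h : ∀ y, f y = g y) :
    satN' a f = satN' a g := by
  unfold satN'
  exact List.countP_congr (fun p _ => by rw [h p.1])

-- an index loop reading L[i+j] for j < n folds the window (L.drop i).take n
lemma foldl_range_window {β : Type} (L : List String) (f : β → String → β) (i : Nat) :
    ∀ (n : Nat), i + n ≤ L.length → ∀ (init : β),
      (PySem.List.pyRange 0 (n : Int)).foldl
        (fun d j => f d (PySem.List.pyGetD L ((i : Int) + j) "")) init
      = ((L.drop i).take n).foldl f init := by
  intro n
  induction n with
  | zero =>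
    intro _ init
    rw [PySem.List.pyRange_one_eq_nil (by norm_num)]
    simp
  | succ n ih =>
    intro h init
    have h2 : PySem.List.pyRange 0 ((n : Nat) + 1 : Nat) = PySem.List.pyRange 0 (n : Int) ++ [(n : Int)] := by
      push_cast
      exact PySem.List.pyRange_one_succ_right (by positivity)
    rw [h2, List.foldl_append, ih (by omega)]
    have hlt : n < (L.drop i).length := by simp; omega
    have hget : PySem.List.pyGetD L ((i : Int) + (n : Int)) "" = (L.drop i)[n] := by
      have hc : ((i : Int) + (n : Int)) = ((i + n : Nat) : Int) := by push_cast; ring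
      rw [hc, PySem.List.pyGetD_natCast]
      rw [List.getElem_drop]
      rw [List.getD_eq_getElem?_getD, List.getElem?_eq_getElem (by omega)]
      simp
    have htake : (L.drop i).take (n + 1) = (L.drop i).take n ++ [(L.drop i)[n]] := by
      rw [List.take_succ, List.getElem?_eq_getElem hlt]
      simp
    rw [htake, List.foldl_append]
    simp [hget]

-- A's inner 10-step dict build is the counter of the window
lemma innerA (L : List String) (i : Nat) (h : i + 10 ≤ L.length) :
    (PySem.List.pyRange 0 10).foldl (fun d j =>
        d.insert (PySem.List.pyGetD L ((i : Int) + j) "")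
          (d.getD (PySem.List.pyGetD L ((i : Int) + j) "") 0 + 1))
      (PySem.Dict.empty : PySem.Dict String Int)
      = PySem.Dict.counter (winW L i) :=
  (foldl_range_window L (fun (d : PySem.Dict String Int) x => d.insert x (d.getD x 0 + 1)) i 10 h _).trans
    (PySem.Dict.foldl_insert_getD_add_one_eq_counter _)

-- counting the satisfied pairs after one pointwise update of the count function
lemma countP_update (items : List (String × Int)) (hnd : (items.map Prod.fst).Nodup)
    (x : String) (n : Int) (hmem : (x, n) ∈ items) (f f' : String → Int)
    (hx : ∀ y, y ≠ x → f' y = f y) :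
    (items.countP (fun p => p.2 ≤ f' p.1) : Int)
      = (items.countP (fun p => p.2 ≤ f p.1) : Int)
        + ((if n ≤ f' x then 1 else 0) - (if n ≤ f x then 1 else 0)) := by
  induction items with
  | nil => cases hmem
  | cons q rest ih =>
    simp only [List.map_cons, List.nodup_cons] at hnd
    by_cases hq : q.1 = x
    · have hqx : q = (x, n) := by
        rcases List.mem_cons.mp hmem with h | h
        · exact h.symm
        · exact absurd (List.mem_map.mpr ⟨(x, n), h, rfl⟩) (by rw [hq] at hnd; exact hnd.1)
      subst hqx
      have hrest : rest.countP (fun p => p.2 ≤ f' p.1) = rest.countP (fun p => p.2 ≤ f p.1) := by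
        apply List.countP_congr
        intro p hp
        rw [hx p.1 (fun hpx => hnd.1 (List.mem_map.mpr ⟨p, hp, by simp [hpx]⟩))]
      rw [List.countP_cons, List.countP_cons, hrest]
      push_cast
      split_ifs <;> simp_all
    · have hmem' : (x, n) ∈ rest := by
        rcases List.mem_cons.mp hmem with h | h
        · exact absurd (congrArg Prod.fst h.symm) hq
        · exact h
      rw [List.countP_cons, List.countP_cons]
      have hhead : (decide (q.2 ≤ f' q.1)) = (decide (q.2 ≤ f q.1)) := by
        rw [hx q.1 hq]
      push_cast
      rw [hhead]
      have := ih hnd.2 hmem'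
      push_cast at this
      omega

-- keys of the need-dict built by the first loop are distinct
lemma nodup_need (want : List String) (number : List Int) :
    ((List.zip want number).foldl (fun d p => d.insert p.1 p.2)
      (PySem.Dict.empty : PySem.Dict String Int)).keys.Nodup :=
  PySem.Dict.nodup_keys_foldl_insert_key (List.zip want number) Prod.fst (fun _ p => p.2) _
    PySem.Dict.nodup_keys_empty

-- satN' congruence restricted to items actually present
lemma satN'_congr' (a : PySem.Dict String Int) (f g : String → Int)
    (h : ∀ p ∈ a.items, f p.1 = g p.1) : satN' a f = satN' a g := by
  unfold satN'
  exact List.countP_congr (fun p hp => by rw [h p hp])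


-- bumpB preserves the two invariants: the count table and the satisfied counter
lemma bumpB_spec (need cnt : PySem.Dict String Int) (hnd : need.keys.Nodup)
    (sat : Int) (x : String) (d : Int) (f : String → Int)
    (hcnt : ∀ y, cnt.getD y 0 = f y)
    (hsat : sat = (satN' need f : Int)) :
    (∀ y, (bumpB cnt sat need x d).1.getD y 0 = (if y = x then f x + d else f y)) ∧
    (bumpB cnt sat need x d).2 = (satN' need (fun y => if y = x then f x + d else f y) : Int) := by
  have hkeys : (need.items.map Prod.fst).Nodup := hnd
  have hins : ∀ y, (cnt.insert x (cnt.getD x 0 + d)).getD y 0 = (if y = x then f x + d else f y) := by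
    intro y
    rw [PySem.Dict.getD_insert, hcnt x, hcnt y]
  cases hget : need.get? x with
  | none =>
    have hnk : x ∉ need.keys := (PySem.Dict.get?_eq_none_iff_not_mem_keys need x).mp hget
    have hcong : satN' need (fun y => if y = x then f x + d else f y) = satN' need f := by
      apply satN'_congr'
      intro p hp
      have hne : p.1 ≠ x := fun hpx => hnk (hpx ▸ PySem.Dict.mem_keys_of_mem_items need hp)
      simp [hne]
    simp only [bumpB, hget]
    exact ⟨hins, by rw [hcong, hsat]⟩
  | some n =>
    have hmem : (x, n) ∈ need.items := (PySem.Dict.get?_eq_some_iff_mem_items need x n hnd).mp hget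
    have hupd := countP_update need.items hkeys x n hmem f
      (fun y => if y = x then f x + d else f y) (fun y hy => if_neg hy)
    have hxx : ((fun y => if y = x then f x + d else f y) x) = f x + d := by simp
    rw [hxx] at hupd
    simp only [bumpB, hget]
    constructor
    · intro y
      have h := hins y
      split_ifs at h ⊢ <;> exact h
    · simp only [hcnt]
      unfold satN' at hsat ⊢
      split_ifs with h1 h2 <;> rw [hupd] <;> split_ifs <;> omega

-- sliding the window one step changes the count only at the leaving and entering element
lemma count_winW_succ (L : List String) (k : Nat) (h : k + 11 ≤ L.length) (y : String) :
    ((winW L (k+1)).count y : Int)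
      = ((winW L k).count y : Int)
        - (if y = L.getD k "" then 1 else 0) + (if y = L.getD (k+10) "" then 1 else 0) := by
  have hk : k < L.length := by omega
  have hk10 : k + 10 < L.length := by omega
  have hgk : L.getD k "" = L[k] := by
    rw [List.getD_eq_getElem?_getD, List.getElem?_eq_getElem hk]; rfl
  have hgk10 : L.getD (k+10) "" = L[k+10] := by
    rw [List.getD_eq_getElem?_getD, List.getElem?_eq_getElem hk10]; rfl
  have h9 : 9 < (L.drop (k+1)).length := by simp; omega
  have hd9 : (L.drop (k+1))[9]'h9 = L[k+10]'hk10 := by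
    rw [List.getElem_drop]
  have h1 : winW L k = L[k] :: ((L.drop (k+1)).take 9) := by
    unfold winW
    rw [List.drop_eq_getElem_cons hk, show (10:Nat) = 9+1 from rfl, List.take_succ_cons]
  have h2 : winW L (k+1) = ((L.drop (k+1)).take 9) ++ [L[k+10]] := by
    unfold winW
    rw [List.take_succ, List.getElem?_eq_getElem h9, hd9]
    simp
  rw [h1, h2, hgk, hgk10]
  simp only [List.count_cons, List.count_append, List.count_nil, beq_iff_eq]
  push_cast
  by_cases hA : y = L[k]
  · by_cases hB : y = L[k+10]
    · simp [← hA, ← hB]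
    · simp [← hA, hB, Ne.symm hB]
  · by_cases hB : y = L[k+10]
    · simp [hA, Ne.symm hA, ← hB]
    · simp [hA, Ne.symm hA, hB, Ne.symm hB]

-- pointwise: two bump updates turn the counts of window m into the counts of window m+1
lemma shift_fun (L : List String) (m : Nat) (h : m + 11 ≤ L.length) (y : String) :
    (if y = L.getD (m+10) ""
        then (if L.getD (m+10) "" = L.getD m ""
                then ((winW L m).count (L.getD m "") : Int) + (-1)
                else ((winW L m).count (L.getD (m+10) "") : Int)) + 1
        else if y = L.getD m "" then ((winW L m).count (L.getD m "") : Int) + (-1)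
             else ((winW L m).count y : Int))
      = ((winW L (m+1)).count y : Int) := by
  have hcs := count_winW_succ L m h y
  rw [hcs]
  split_ifs <;> first | omega | (simp_all <;> omega)

-- the loop of B maintains: answer = #good windows so far, cnt = window counts, sat = #satisfied pairs
lemma loopB_inv (L : List String) (need : PySem.Dict String Int) (hnd : need.keys.Nodup)
    (init : Int × PySem.Dict String Int × Int)
    (hc0 : ∀ y, init.2.1.getD y 0 = ((winW L 0).count y : Int))
    (hs0 : init.2.2 = (satN need (winW L 0) : Int))
    (ha0 : init.1 = (((List.range 1).countP (fun i => checkN need (winW L i))) : Int)) :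
    ∀ m, m + 10 ≤ L.length →
      ((PySem.List.pyRange 1 ((m : Int) + 1)).foldl (bodyB L need) init).1
        = ((List.range (m+1)).countP (fun i => checkN need (winW L i)) : Int)
      ∧ (∀ y, ((PySem.List.pyRange 1 ((m : Int) + 1)).foldl (bodyB L need) init).2.1.getD y 0
            = ((winW L m).count y : Int))
      ∧ ((PySem.List.pyRange 1 ((m : Int) + 1)).foldl (bodyB L need) init).2.2
          = (satN need (winW L m) : Int) := by
  intro m
  induction m with
  | zero =>
    intro _
    rw [show (((0:Nat) : Int) + 1) = 1 by simp, PySem.List.pyRange_one_eq_nil le_rfl]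
    exact ⟨ha0, hc0, hs0⟩
  | succ m ih =>
    intro h
    obtain ⟨iha, ihc, ihs⟩ := ih (by omega)
    have hsplit : PySem.List.pyRange 1 (((m+1 : Nat) : Int) + 1)
        = PySem.List.pyRange 1 ((m : Int) + 1) ++ [(m : Int) + 1] := by
      push_cast
      exact PySem.List.pyRange_one_succ_right (by omega)
    rw [hsplit, List.foldl_append]
    set stm := (PySem.List.pyRange 1 ((m : Int) + 1)).foldl (bodyB L need) init with hstm
    have hout : PySem.List.pyGetD L ((m : Int) + 1 - 1) "" = L.getD m "" := by
      rw [show ((m : Int) + 1 - 1) = ((m : Nat) : Int) by ring, PySem.List.pyGetD_natCast]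
    have hinc : PySem.List.pyGetD L ((m : Int) + 1 + 9) "" = L.getD (m+10) "" := by
      rw [show ((m : Int) + 1 + 9) = ((m + 10 : Nat) : Int) by push_cast; ring,
        PySem.List.pyGetD_natCast]
    have hb1 := bumpB_spec need stm.2.1 hnd stm.2.2 (L.getD m "") (-1)
      (fun y => ((winW L m).count y : Int)) ihc (by rw [ihs]; rfl)
    have hb2 := bumpB_spec need (bumpB stm.2.1 stm.2.2 need (L.getD m "") (-1)).1 hnd
      (bumpB stm.2.1 stm.2.2 need (L.getD m "") (-1)).2 (L.getD (m+10) "") 1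
      (fun y => if y = L.getD m "" then ((winW L m).count (L.getD m "") : Int) + (-1)
                else ((winW L m).count y : Int)) hb1.1 hb1.2
    have hf2 : ∀ y, (if y = L.getD (m+10) ""
          then (fun y => if y = L.getD m "" then ((winW L m).count (L.getD m "") : Int) + (-1)
                else ((winW L m).count y : Int)) (L.getD (m+10) "") + 1
          else (fun y => if y = L.getD m "" then ((winW L m).count (L.getD m "") : Int) + (-1)
                else ((winW L m).count y : Int)) y)
        = ((winW L (m+1)).count y : Int) := fun y => shift_fun L m (by omega) y
    have hsat2 : (bumpB (bumpB stm.2.1 stm.2.2 need (L.getD m "") (-1)).1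
          (bumpB stm.2.1 stm.2.2 need (L.getD m "") (-1)).2 need (L.getD (m+10) "") 1).2
        = (satN need (winW L (m+1)) : Int) := by
      rw [hb2.2]
      congr 1
      exact satN'_congr need _ _ hf2
    have hcnt2 : ∀ y, (bumpB (bumpB stm.2.1 stm.2.2 need (L.getD m "") (-1)).1
          (bumpB stm.2.1 stm.2.2 need (L.getD m "") (-1)).2 need (L.getD (m+10) "") 1).1.getD y 0
        = ((winW L (m+1)).count y : Int) := by
      intro y
      rw [hb2.1 y]
      exact hf2 y
    have hcond : ((bumpB (bumpB stm.2.1 stm.2.2 need (L.getD m "") (-1)).1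
          (bumpB stm.2.1 stm.2.2 need (L.getD m "") (-1)).2 need (L.getD (m+10) "") 1).2
          = (need.size : Int))
        ↔ (checkN need (winW L (m+1)) = true) := by
      rw [hsat2, checkN_iff_satN]
      constructor
      · intro hh
        exact_mod_cast hh
      · intro hh
        exact_mod_cast congrArg (Nat.cast : Nat → Int) hh
    refine ⟨?_, ?_, ?_⟩
    · show (bodyB L need stm ((m : Int) + 1)).1 = _
      simp only [bodyB, hout, hinc]
      rw [List.range_succ, List.countP_append]
      by_cases hch : checkN need (winW L (m+1)) = true
      · rw [if_pos (hcond.mpr hch), iha]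
        simp [hch]
      · rw [if_neg (fun hc => hch (hcond.mp hc)), iha]
        simp [hch]
    · show ∀ y, (bodyB L need stm ((m : Int) + 1)).2.1.getD y 0 = _
      simp only [bodyB, hout, hinc]
      exact hcnt2
    · show (bodyB L need stm ((m : Int) + 1)).2.2 = _
      simp only [bodyB, hout, hinc]
      exact hsat2

-- A's whole loop counts the good windows
lemma A_eval (L : List String) (nd : PySem.Dict String Int) :
    (PySem.List.pyRange 0 ((L.length : Int) - 9)).foldl (fun answer i =>
      let dct := (PySem.List.pyRange 0 10).foldl (fun d j =>
        d.insert (PySem.List.pyGetD L (i + j) "")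
          (d.getD (PySem.List.pyGetD L (i + j) "") 0 + 1))
        (PySem.Dict.empty : PySem.Dict String Int)
      if nd.items.all (fun p => p.2 ≤ dct.getD p.1 0) then answer + 1 else answer) 0
    = ((List.range (L.length - 9)).countP (fun i => checkN nd (winW L i)) : Int) := by
  rw [PySem.List.pyRange_one 0 ((L.length : Int) - 9)]
  have hN : (((L.length : Int) - 9) - 0).toNat = L.length - 9 := by omega
  rw [hN, List.foldl_map]
  rw [PySem.List.foldl_congr_mem _ _
      (fun ans (i : Nat) => if checkN nd (winW L i) then ans + 1 else ans) 0 ?_]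
  · rw [PySem.List.foldl_count_if, zero_add]
  · intro acc k hk
    have hk10 : k + 10 ≤ L.length := by
      have := List.mem_range.mp hk
      omega
    simp only [zero_add, innerA L k hk10, PySem.Dict.getD_counter]
    rfl

-- ===== VERDICT (by name: the statement is the Claim_ definition above) =====
theorem solution_spec : Claim_equal_solution := by
  intro want number discount _
  show solution want number discount = solution_alt want number discount
  by_cases hlen : discount.length < 10
  · have hA0 : solution want number discount = 0 := by
      simp only [solution]
      rw [PySem.List.pyRange_one_eq_nil (a := 0) (b := (discount.length : Int) - 9) (by omega)]
      rfl
    have hB0 : solution_alt want number discount = 0 := by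
      simp only [solution_alt]
      rw [if_pos hlen]
    rw [hA0, hB0]
  · have hndk := nodup_need want number
    set nd := (List.zip want number).foldl (fun d p => d.insert p.1 p.2)
      (PySem.Dict.empty : PySem.Dict String Int) with hnddef
    have hA : solution want number discount
        = ((List.range (discount.length - 9)).countP (fun i => checkN nd (winW discount i)) : Int) :=
      A_eval discount nd
    have hB : solution_alt want number discount
        = ((List.range (discount.length - 9)).countP (fun i => checkN nd (winW discount i)) : Int) := by
      have hsl : PySem.List.slice discount none (some 10) = winW discount 0 := by
        rw [show ((10 : Int)) = ((10 : Nat) : Int) by norm_num, PySem.List.slice_to_natCast]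
        unfold winW
        rw [List.drop_zero]
      show (if discount.length < 10 then (0 : Int) else _) = _
      rw [if_neg hlen]
      set c0 := (PySem.List.slice discount none (some 10)).foldl
        (fun (d : PySem.Dict String Int) x => d.insert x (d.getD x 0 + 1)) PySem.Dict.empty
        with hc0def
      have hc : ∀ y, c0.getD y 0 = ((winW discount 0).count y : Int) := by
        intro y
        rw [hc0def, hsl, PySem.Dict.foldl_insert_getD_add_one_eq_counter,
          PySem.Dict.getD_counter]
      set s0 := nd.items.foldl (fun s p => if p.2 ≤ c0.getD p.1 0 then s + 1 else s) (0 : Int)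
        with hs0def
      have hs : s0 = (satN nd (winW discount 0) : Int) := by
        have hbool : (fun (s : Int) (p : String × Int) => if p.2 ≤ c0.getD p.1 0 then s + 1 else s)
            = (fun s p => if (decide (p.2 ≤ c0.getD p.1 0)) = true then s + 1 else s) := by
          funext s p
          by_cases hp : p.2 ≤ c0.getD p.1 0 <;> simp [hp]
        rw [hs0def, hbool, PySem.List.foldl_count_if, zero_add]
        congr 1
        apply List.countP_congr
        intro p _
        rw [hc p.1]
      set a0 := (if s0 = (nd.size : Int) then (1 : Int) else 0) with ha0def
      have hcond0 : (s0 = (nd.size : Int)) ↔ (checkN nd (winW discount 0) = true) := by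
        rw [hs, checkN_iff_satN]
        constructor
        · intro hh; exact_mod_cast hh
        · intro hh; exact_mod_cast congrArg (Nat.cast : Nat → Int) hh
      have ha : a0 = (((List.range 1).countP (fun i => checkN nd (winW discount i))) : Int) := by
        rw [ha0def]
        by_cases hch : checkN nd (winW discount 0) = true
        · rw [if_pos (hcond0.mpr hch)]
          simp [hch]
        · rw [if_neg (fun hc' => hch (hcond0.mp hc'))]
          simp [hch]
      have hN10 : (discount.length - 10) + 10 ≤ discount.length := by omega
      have hinv := loopB_inv discount nd hndk (a0, c0, s0) hc hs ha (discount.length - 10) hN10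
      have hrange : ((discount.length : Int) - 9) = (((discount.length - 10 : Nat)) : Int) + 1 := by
        omega
      rw [hrange]
      have hfin : discount.length - 10 + 1 = discount.length - 9 := by omega
      rw [← hfin]
      exact hinv.1
    rw [hA, hB]
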